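-- pv_equiv track=rewrite | github.com/sergioberino/licitaciones-espana | comunidad_madrid/descarga_contratacion_comunidad_madrid_v1.py | transformar_antibot_key
-- ===== SOURCE A (Python) =====
-- def transformar_antibot_key(key):
--     """
--     Drupal antibot module: el JavaScript invierte la key en pares de 2
--     caracteres desde el final.
--     """
--     result = ''
--     for i in range(len(key) - 1, -1, -2):
--         if i - 1 >= 0:
--             result += key[i-1] + key[i]
--         else:
--             result += key[i]
--     return result
-- ===== SOURCE B (Python) =====
-- def transformar_antibot_key(key):
--     r = key[::-1]
--     return ''.join(r[i:i+2][::-1] for i in range(0, len(r), 2))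
-- ===== Notes on version B (the rewrite author's own statement) =====
-- stated objective: alternative
-- what changed: Replaces A's backward step-2 index loop with an explicit odd-length branch by a reverse-then-forward-chunk pass: fully reverse the string once, walk it forward in chunks of two, reverse each chunk back; slicing handles the final lone character and the empty string with no conditional.
import Mathlib
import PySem

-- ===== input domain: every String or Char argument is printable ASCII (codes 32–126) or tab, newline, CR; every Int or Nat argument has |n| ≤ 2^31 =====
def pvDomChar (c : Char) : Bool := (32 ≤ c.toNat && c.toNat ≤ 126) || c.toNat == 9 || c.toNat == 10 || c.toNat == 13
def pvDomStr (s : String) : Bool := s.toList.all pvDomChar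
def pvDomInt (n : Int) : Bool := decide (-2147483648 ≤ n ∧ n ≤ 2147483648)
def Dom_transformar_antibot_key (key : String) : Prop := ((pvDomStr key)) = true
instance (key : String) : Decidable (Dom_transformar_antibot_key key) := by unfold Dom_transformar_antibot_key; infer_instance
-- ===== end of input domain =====

-- B replaces A's backward step-2 index loop (with its lone-character branch) by reverse-then-chunk-of-two; alternative decomposition, no speed claim.

-- ===== PORT A =====
-- literal port of A: result accumulated over range(len(key)-1, -1, -2), appending key[i-1]+key[i] or the lone key[i]
def transformar_antibot_key (key : String) : String :=
  let cs := key.toList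
  let result := (PySem.List.pyRange ((cs.length : Int) - 1) (-1) (-2)).foldl
    (fun res i =>
      if i - 1 ≥ 0 then
        res ++ [PySem.List.pyGetD cs (i - 1) ' ', PySem.List.pyGetD cs i ' ']
      else
        res ++ [PySem.List.pyGetD cs i ' '])
    []
  String.ofList result

-- ===== PORT B =====
-- literal port of Source B: r = key[::-1]; ''.join(r[i:i+2][::-1] for i in range(0, len(r), 2))
-- (''.join of the chunk strings is concatenation, ported as List.flatten over the chunk char-lists; exact)
def transformar_antibot_key_alt (key : String) : String :=
  let r := match PySem.List.slice? key.toList none none (-1) with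
    | some l => l
    | none => []   -- unreachable: step -1 ≠ 0
  let chunks := (PySem.List.pyRange 0 (r.length : Int) 2).map (fun i =>
    match PySem.List.slice? (PySem.List.slice r (some i) (some (i + 2))) none none (-1) with
    | some l => l
    | none => [])  -- unreachable: step -1 ≠ 0
  String.ofList chunks.flatten

-- ===== PRECONDITION & SPEC =====
def Spec_transformar_antibot_key (key : String) (out : String) : Prop := out = transformar_antibot_key_alt key
instance (key : String) (out : String) : Decidable (Spec_transformar_antibot_key key out) := by unfold Spec_transformar_antibot_key; infer_instance

-- ===== CLAIM (what is proved, stated in full; the proofs are below) =====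
def Claim_equal_transformar_antibot_key : Prop := ∀ (key : String), Dom_transformar_antibot_key key → Spec_transformar_antibot_key key (transformar_antibot_key key)

-- ===== LEMMAS AND PROOFS =====

-- common description of the result: on the REVERSED string, swap adjacent pairs
def pairsRev : List Char → List Char
  | [] => []
  | [x] => [x]
  | x :: y :: rest => y :: x :: pairsRev rest

lemma pyRange_two_nil (a b : Int) (h : b ≤ a) : PySem.List.pyRange a b 2 = [] := by
  rw [PySem.List.pyRange_of_pos a b (by norm_num)]
  simp [if_neg (by omega : ¬ a < b)]

lemma pyRange_two_cons (a b : Int) (h : a < b) :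
    PySem.List.pyRange a b 2 = a :: PySem.List.pyRange (a + 2) b 2 := by
  rw [PySem.List.pyRange_of_pos a b (by norm_num), PySem.List.pyRange_of_pos (a+2) b (by norm_num)]
  have hk : (if a < b then ((b - a + 2 - 1) / 2).toNat else 0)
      = (if a + 2 < b then ((b - (a + 2) + 2 - 1) / 2).toNat else 0) + 1 := by
    split_ifs <;> omega
  rw [hk, List.range_succ_eq_map, List.map_cons, List.map_map]
  refine congrArg₂ _ (by ring) (List.map_congr_left ?_)
  intro k _
  simp [Function.comp]
  ring

lemma pyRange_negtwo_nil (a b : Int) (h : a ≤ b) : PySem.List.pyRange a b (-2) = [] := by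
  simp [PySem.List.pyRange, if_neg (by omega : ¬ b < a)]

lemma pyRange_negtwo_cons (a b : Int) (h : b < a) :
    PySem.List.pyRange a b (-2) = a :: PySem.List.pyRange (a - 2) b (-2) := by
  simp only [PySem.List.pyRange]
  norm_num
  have hk : (if b < a then ((a - b + (2:Int) - 1) / 2).toNat else 0)
      = (if b < a - 2 then ((a - 2 - b + (2:Int) - 1) / 2).toNat else 0) + 1 := by
    split_ifs <;> omega
  rw [hk, List.range_succ_eq_map, List.map_cons, List.map_map]
  refine congrArg₂ _ (by ring) (List.map_congr_left ?_)
  intro k _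
  simp [Function.comp]
  ring

-- A's loop, generalized: the range walks the last r.length indices downward,
-- the list indexed is r.reverse ++ tail, and the accumulator is arbitrary.
lemma loopA (r : List Char) : ∀ (tail acc : List Char),
    (PySem.List.pyRange ((r.length : Int) - 1) (-1) (-2)).foldl
      (fun res i =>
        if i - 1 ≥ 0 then
          res ++ [PySem.List.pyGetD (r.reverse ++ tail) (i - 1) ' ', PySem.List.pyGetD (r.reverse ++ tail) i ' ']
        else
          res ++ [PySem.List.pyGetD (r.reverse ++ tail) i ' '])
      acc = acc ++ pairsRev r := by
  induction r using pairsRev.induct with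
  | case1 =>
      intro tail acc
      rw [pyRange_negtwo_nil _ _ (by norm_num)]
      simp [pairsRev]
  | case2 x =>
      intro tail acc
      rw [pyRange_negtwo_cons _ _ (by norm_num), pyRange_negtwo_nil _ _ (by norm_num)]
      simp [pairsRev, PySem.List.pyGetD]
  | case3 x y rest ih =>
      intro tail acc
      have hlen : ((x :: y :: rest).length : Int) - 1 = ((rest.length + 1 : Nat) : Int) := by
        push_cast; simp; try ring
      rw [hlen, pyRange_negtwo_cons _ _ (by omega)]
      have h2 : ((rest.length + 1 : Nat) : Int) - 2 = ((rest.length : Nat) : Int) - 1 := by push_cast; ring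
      have hxs : (x :: y :: rest).reverse ++ tail = rest.reverse ++ ([y] ++ ([x] ++ tail)) := by simp
      have hgety : PySem.List.pyGetD ((x :: y :: rest).reverse ++ tail) (((rest.length + 1 : Nat) : Int) - 1) ' ' = y := by
        have h1 : ((rest.length + 1 : Nat) : Int) - 1 = ((rest.length : Nat) : Int) := by push_cast; ring
        rw [h1, hxs, PySem.List.pyGetD_natCast]
        have hlr : rest.length = rest.reverse.length := by simp
        rw [List.getD, hlr, List.getElem?_append_right (le_refl _)]
        simp
      have hgetx : PySem.List.pyGetD ((x :: y :: rest).reverse ++ tail) ((rest.length + 1 : Nat) : Int) ' ' = x := by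
        have hx2 : rest.reverse ++ ([y] ++ ([x] ++ tail)) = (rest.reverse ++ [y]) ++ (x :: tail) := by simp
        rw [hxs, hx2, PySem.List.pyGetD_natCast]
        have hlen2 : rest.length + 1 = (rest.reverse ++ [y]).length := by simp
        rw [List.getD, hlen2, List.getElem?_append_right (le_refl _)]
        simp
      rw [List.foldl_cons]
      rw [if_pos (show ((rest.length + 1 : Nat) : Int) - 1 ≥ 0 by omega)]
      rw [hgety, hgetx, h2, hxs]
      rw [ih ([y] ++ ([x] ++ tail)) (acc ++ [y, x])]
      simp [pairsRev]

-- B's chunk pass, generalized: xs = pre ++ r and the range starts at pre.length.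
lemma loopB (r : List Char) : ∀ (pre xs : List Char), xs = pre ++ r →
    ((PySem.List.pyRange ((pre.length : Nat) : Int) ((xs.length : Nat) : Int) 2).map (fun i =>
      match PySem.List.slice? (PySem.List.slice xs (some i) (some (i + 2))) none none (-1) with
      | some l => l
      | none => [])).flatten = pairsRev r := by
  induction r using pairsRev.induct with
  | case1 =>
      intro pre xs h
      subst h
      rw [pyRange_two_nil _ _ (by simp)]
      simp [pairsRev]
  | case2 x =>
      intro pre xs h
      subst h
      have hl : (((pre ++ [x]).length : Nat) : Int) = ((pre.length : Nat) : Int) + 1 := by simp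
      rw [hl, pyRange_two_cons _ _ (by omega), pyRange_two_nil _ _ (by omega)]
      have hs : PySem.List.slice (pre ++ [x]) (some ((pre.length : Nat) : Int)) (some (((pre.length : Nat) : Int) + 2)) = [x] := by
        have h2 : ((pre.length : Nat) : Int) + 2 = ((pre.length : Nat) : Int) + ((2 : Nat) : Int) := by norm_num
        rw [h2, PySem.List.slice_natCast_add]
        simp
      rw [List.map_cons, List.map_nil, List.flatten_cons, List.flatten_nil, hs,
        PySem.List.slice?_none_none_neg_one]
      simp [pairsRev]
  | case3 x y rest ih =>
      intro pre xs h
      subst h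
      have hl : (((pre ++ x :: y :: rest).length : Nat) : Int) = ((pre.length : Nat) : Int) + 2 + rest.length := by
        simp; try ring
      rw [hl, pyRange_two_cons _ _ (by omega)]
      have hs : PySem.List.slice (pre ++ x :: y :: rest) (some ((pre.length : Nat) : Int)) (some (((pre.length : Nat) : Int) + 2)) = [x, y] := by
        have h2 : ((pre.length : Nat) : Int) + 2 = ((pre.length : Nat) : Int) + ((2 : Nat) : Int) := by norm_num
        rw [h2, PySem.List.slice_natCast_add]
        simp [List.take_succ_cons]
      rw [List.map_cons, List.flatten_cons, hs, PySem.List.slice?_none_none_neg_one]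
      have hpre2 : ((pre.length : Nat) : Int) + 2 = (((pre ++ [x, y]).length : Nat) : Int) := by
        simp; try ring
      rw [hpre2]
      have hend : (((pre ++ [x, y]).length : Nat) : Int) + rest.length = ((((pre ++ [x, y]) ++ rest).length : Nat) : Int) := by
        simp; try ring
      have hxs : pre ++ x :: y :: rest = (pre ++ [x, y]) ++ rest := by simp
      rw [hend, hxs, ih (pre ++ [x, y]) ((pre ++ [x, y]) ++ rest) rfl]
      simp [pairsRev]

-- ===== VERDICT (by name: the statement is the Claim_ definition above) =====
theorem transformar_antibot_key_spec : Claim_equal_transformar_antibot_key := by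
  intro key _
  unfold Spec_transformar_antibot_key transformar_antibot_key transformar_antibot_key_alt
  rw [PySem.List.slice?_none_none_neg_one]
  simp only
  congr 1
  have hA := loopA key.toList.reverse [] []
  simp only [List.reverse_reverse, List.append_nil, List.length_reverse] at hA
  have hB := loopB key.toList.reverse [] key.toList.reverse rfl
  simp only [List.length_nil, Nat.cast_zero] at hB
  rw [hB]
  simpa using hA
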